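-- pv_equiv track=rewrite | github.com/ikokkari/PythonProblems | labs109.py | duplicate_digit_bonus
-- ===== SOURCE A (Python) =====
-- def duplicate_digit_bonus(n):
--     total, prev, tally, first = 0, -1, 0, 2
--     while n >= 0:
--         d = n % 10 if n > 0 else -1
--         n = n // 10 if n > 0 else -1
--         if d == prev:
--             tally += 1
--         else:
--             if tally > 0 and prev > -1:
--                 add = (10 ** (tally - 1)) * (2 if first > 0 else 1)
--                 total += add
--             first -= 1
--             prev, tally = d, 0
--     return total
-- ===== SOURCE B (Python) =====
-- # Run-length decomposition of str(n): recursive RLE, then score runs left to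
-- # right, doubling the last (units-digit) run.
-- def _runlengths(s):
--     if not s:
--         return []
--     i = 1
--     while i < len(s) and s[i] == s[0]:
--         i += 1
--     return [i] + _runlengths(s[i:])
--
-- def _score(runs):
--     if not runs:
--         return 0
--     L = runs[0]
--     bonus = 10 ** (L - 2) if L >= 2 else 0
--     if len(runs) == 1:
--         return 2 * bonus
--     return bonus + _score(runs[1:])
--
-- def duplicate_digit_bonus(n):
--     if n < 0:
--         return 0
--     return _score(_runlengths(str(n)))
-- ===== Notes on version B (the rewrite author's own statement) =====
-- stated objective: alternative
-- what changed: A fuses scoring into a right-to-left digit-peeling loop with a sentinel flush and a decrementing 'first' counter; B converts str(n) to an explicit run-length list by recursive descent and then scores the runs left to right, doubling the last (units-digit) run.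
import Mathlib
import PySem

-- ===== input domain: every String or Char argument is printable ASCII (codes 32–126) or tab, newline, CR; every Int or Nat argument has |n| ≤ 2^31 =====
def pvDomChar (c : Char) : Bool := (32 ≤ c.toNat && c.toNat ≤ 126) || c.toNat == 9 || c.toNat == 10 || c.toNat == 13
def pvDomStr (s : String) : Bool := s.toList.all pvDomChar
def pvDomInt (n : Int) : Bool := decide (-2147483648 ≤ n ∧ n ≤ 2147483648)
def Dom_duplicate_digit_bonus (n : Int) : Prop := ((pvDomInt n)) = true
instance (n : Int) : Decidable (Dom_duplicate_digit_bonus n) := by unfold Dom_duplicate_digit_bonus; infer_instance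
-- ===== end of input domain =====

-- B restructures A's fused right-to-left digit-peeling/sentinel loop as: recursive
-- run-length encoding of str(n), then a left-to-right scoring of the run lengths
-- that doubles the last (units-digit) run. Alternative decomposition; same cost.

-- ===== PORT A =====
-- while n >= 0: peel d = n % 10 (sentinel d = -1 once n hits 0), maintain
-- (total, prev, tally, first).  '10 ** (tally - 1)' only occurs under tally > 0,
-- so '(tally - 1).toNat' is exact there.
def dupLoopA (total prev tally first n : Int) : Int :=
  if 0 ≤ n then
    let d : Int := if 0 < n then PySem.Int.mod n 10 else -1
    let n' : Int := if 0 < n then PySem.Int.floordiv n 10 else -1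
    if d = prev then
      dupLoopA total prev (tally + 1) first n'
    else
      let total' : Int :=
        if tally > 0 ∧ prev > -1 then
          total + 10 ^ (tally - 1).toNat * (if first > 0 then 2 else 1)
        else total
      dupLoopA total' d 0 (first - 1) n'
  else total
termination_by (n + 1).toNat
decreasing_by
  all_goals
    by_cases hpos : 0 < n
    · rw [dif_pos hpos, PySem.Int.floordiv_eq_ediv_of_pos (by omega : (0:Int) < 10)]
      omega
    · rw [dif_neg hpos]
      omega

def duplicate_digit_bonus (n : Int) : Int :=
  dupLoopA 0 (-1) 0 2 n

-- ===== PORT B =====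
-- _runlengths(s): length of the leading run, recurse on the rest.
def rleB (cs : List Char) : List Nat :=
  match cs with
  | [] => []
  | c :: rest =>
      (1 + (rest.takeWhile (fun x => x == c)).length)
        :: rleB (rest.dropWhile (fun x => x == c))
termination_by cs.length
decreasing_by
  have := List.length_dropWhile_le (fun x => x == c) rest
  simp; omega

-- _score(runs): head run's bonus, doubled when it is the only (i.e. last) run left.
def scoreB : List Nat → Int
  | [] => 0
  | [L] => 2 * (if 2 ≤ L then (10 : Int) ^ (L - 2) else 0)
  | L :: rest@(_ :: _) =>
      (if 2 ≤ L then (10 : Int) ^ (L - 2) else 0) + scoreB rest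

def duplicate_digit_bonus_alt (n : Int) : Int :=
  if n < 0 then 0 else scoreB (rleB (PySem.Int.toChars n))

-- ===== PRECONDITION & SPEC =====
def Spec_duplicate_digit_bonus (n : Int) (out : Int) : Prop := out = duplicate_digit_bonus_alt n
instance (n : Int) (out : Int) : Decidable (Spec_duplicate_digit_bonus n out) := by unfold Spec_duplicate_digit_bonus; infer_instance

-- ===== CLAIM (what is proved, stated in full; the proofs are below) =====
def Claim_equal_duplicate_digit_bonus : Prop := ∀ (n : Int), Dom_duplicate_digit_bonus n → Spec_duplicate_digit_bonus n (duplicate_digit_bonus n)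

-- ===== LEMMAS AND PROOFS =====

-- little-endian decimal digits of m (empty for m = 0)
def dLE (m : Nat) : List Nat :=
  if m = 0 then [] else m % 10 :: dLE (m / 10)
decreasing_by exact Nat.div_lt_self (by omega) (by omega)

-- A's loop re-expressed over the little-endian digit list (the [] case performs
-- the sentinel d = -1 step).
def listLoopA (total prev tally first : Int) : List Nat → Int
  | [] =>
      if (-1 : Int) = prev then total
      else if tally > 0 ∧ prev > -1 then
        total + 10 ^ (tally - 1).toNat * (if first > 0 then 2 else 1)
      else total
  | d :: rest =>
      if (d : Int) = prev then listLoopA total prev (tally + 1) first rest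
      else
        let total' : Int :=
          if tally > 0 ∧ prev > -1 then
            total + 10 ^ (tally - 1).toNat * (if first > 0 then 2 else 1)
          else total
        listLoopA total' d 0 (first - 1) rest

-- run lengths of (p repeated k times) ++ ds, little-endian state machine
def runlensN (p k : Nat) : List Nat → List Nat
  | [] => [k]
  | d :: rest => if d = p then runlensN p (k + 1) rest else k :: runlensN d 1 rest

-- A's flush values along a run-length list: first > 0 doubles, and first
-- decreases by one per run.
def baseV (L : Nat) : Int := if 2 ≤ L then (10 : Int) ^ (L - 2) else 0

def scoreF (f : Int) : List Nat → Int
  | [] => 0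
  | L :: rest => (if 0 < f then 2 else 1) * baseV L + scoreF (f - 1) rest

theorem dLE_zero : dLE 0 = [] := by rw [dLE]; simp

theorem dLE_pos {m : Nat} (h : 0 < m) : dLE m = m % 10 :: dLE (m / 10) := by
  rw [dLE]; simp [Nat.pos_iff_ne_zero.mp h]

theorem dLE_lt {m : Nat} : ∀ x ∈ dLE m, x < 10 := by
  induction m using Nat.strong_induction_on with
  | _ m ih =>
    intro x hx
    by_cases h : m = 0
    · subst h; rw [dLE_zero] at hx; cases hx
    · rw [dLE_pos (by omega), List.mem_cons] at hx
      rcases hx with rfl | hx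
      · omega
      · exact ih (m / 10) (Nat.div_lt_self (by omega) (by omega)) x hx

-- Step 1: A's arithmetic loop equals the list loop on the digits.
theorem dupLoopA_eq_listLoopA (m : Nat) :
    ∀ t p ta f, dupLoopA t p ta f (m : Int) = listLoopA t p ta f (dLE m) := by
  induction m using Nat.strong_induction_on with
  | _ m ih =>
    intro t p ta f
    by_cases h : m = 0
    · subst h
      have hstop : ∀ t p ta f, dupLoopA t p ta f (-1) = t := by
        intro t p ta f
        rw [dupLoopA]
        norm_num
      rw [dupLoopA]
      simp only [Int.natCast_zero, le_refl, if_true, lt_irrefl, ite_false, dLE_zero,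
        listLoopA, hstop]
    · have hm : 0 < m := by omega
      rw [dupLoopA]
      have hle : (0 : Int) ≤ (m : Int) := by positivity
      have hlt : (0 : Int) < (m : Int) := by exact_mod_cast hm
      simp only [hle, if_pos, hlt]
      have hmod : PySem.Int.mod (m : Int) 10 = ((m % 10 : Nat) : Int) := by
        exact_mod_cast PySem.Int.mod_natCast m 10
      have hdiv : PySem.Int.floordiv (m : Int) 10 = ((m / 10 : Nat) : Int) := by
        exact_mod_cast PySem.Int.floordiv_natCast m 10
      rw [dLE_pos hm]
      simp only [listLoopA, hmod, hdiv, if_pos]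
      have ihd := ih (m / 10) (Nat.div_lt_self hm (by omega))
      by_cases hc : ((m % 10 : Nat) : Int) = p
      · simp only [hc, if_pos, ite_true]
        exact ihd t p (ta + 1) f
      · simp only [hc, if_neg, ite_false]
        exact ihd _ _ 0 (f - 1)

-- Step 2: the list loop is scoreF over the run lengths.
theorem listLoopA_eq_scoreF (ds : List Nat) :
    ∀ (t f : Int) (p k : Nat), 1 ≤ k →
      listLoopA t (p : Int) ((k : Int) - 1) f ds = t + scoreF f (runlensN p k ds) := by
  induction ds with
  | nil =>
    intro t f p k hk
    simp only [listLoopA, runlensN, scoreF, baseV]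
    have hne : ¬((-1 : Int) = (p : Int)) := by omega
    have hpp : ((p : Int) > -1) := by omega
    rw [if_neg hne]
    by_cases h2 : 2 ≤ k
    · have hg : ((k : Int) - 1 > 0) := by omega
      have ht : ((k : Int) - 1 - 1).toNat = k - 2 := by omega
      rw [if_pos ⟨hg, hpp⟩, if_pos h2, ht]
      by_cases hf : 0 < f <;> simp [hf] <;> ring
    · have hk1 : k = 1 := by omega
      subst hk1
      norm_num
  | cons d rest ih =>
    intro t f p k hk
    simp only [listLoopA, runlensN]
    by_cases hdp : d = p
    · subst hdp
      simp only [if_pos, ite_true]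
      have : (k : Int) - 1 + 1 = ((k + 1 : Nat) : Int) - 1 := by push_cast; omega
      rw [this, ih t f d (k + 1) (by omega)]
    · have hne : ¬((d : Int) = (p : Int)) := by exact_mod_cast hdp
      simp only [hdp, hne, if_neg, ite_false]
      have hpp : ((p : Int) > -1) := by omega
      have hstep : ∀ T g : Int, listLoopA T (d : Int) 0 g rest =
          T + scoreF g (runlensN d 1 rest) := by
        intro T g
        have h1 := ih T g d 1 le_rfl
        norm_num at h1
        exact h1
      rw [hstep]
      simp only [scoreF, baseV]
      by_cases h2 : 2 ≤ k
      · have hg : ((k : Int) - 1 > 0) := by omega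
        have ht : ((k : Int) - 1 - 1).toNat = k - 2 := by omega
        rw [if_pos ⟨hg, hpp⟩, if_pos h2, ht]
        by_cases hf : 0 < f <;> simp [hf] <;> ring
      · have hk1 : k = 1 := by omega
        subst hk1
        have hg : ¬(((1 : Nat) : Int) - 1 > 0 ∧ (p : Int) > -1) := by
          intro hcon
          have := hcon.1
          norm_num at this
        have h12 : ¬(2 ≤ 1) := by omega
        rw [if_neg hg, if_neg h12]
        by_cases hf : 0 < f <;> simp [hf]

-- a constant run is a chain of the equality relation
theorem isChain_beq_cons_replicate {α : Type} [BEq α] [LawfulBEq α] (c : α) (k : Nat) :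
    (c :: List.replicate k c).IsChain (fun x y => (x == y) = true) := by
  induction k with
  | zero => exact List.isChain_singleton c
  | succ k ihk =>
    rw [List.replicate_succ]
    exact List.isChain_cons_cons.mpr ⟨by simp, ihk⟩

-- the last element of a head run is the run's character
theorem getLast_cons_takeWhile_beq {α : Type} [BEq α] [LawfulBEq α] (c : α) (rest : List α) :
    (c :: rest.takeWhile (fun x => x == c)).getLast (by simp) = c := by
  have hmem : ∀ b ∈ c :: rest.takeWhile (fun x => x == c), b = c := by
    intro b hb
    rw [List.mem_cons] at hb
    rcases hb with rfl | hb
    · rfl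
    · simpa using List.mem_takeWhile_imp hb
  exact hmem _ (List.getLast_mem _)

-- cons-expansion of splitBy for the equality relation
theorem splitBy_beq_cons {α : Type} [BEq α] [LawfulBEq α] (c : α) (rest : List α) :
    (c :: rest).splitBy (· == ·) =
      (c :: rest.takeWhile (fun x => x == c)) ::
        (rest.dropWhile (fun x => x == c)).splitBy (· == ·) := by
  rw [List.splitBy_eq_iff]
  refine ⟨?_, ?_, ?_, ?_⟩
  · simp [List.takeWhile_append_dropWhile]
  · intro h
    rw [List.mem_cons] at h
    rcases h with h | h
    · exact (List.cons_ne_nil _ _) h.symm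
    · exact List.nil_notMem_splitBy _ _ h
  · intro m hm
    rw [List.mem_cons] at hm
    rcases hm with rfl | hm
    · have hrep : rest.takeWhile (fun x => x == c) =
          List.replicate (rest.takeWhile (fun x => x == c)).length c := by
        apply List.eq_replicate_of_mem
        intro b hb
        have := List.mem_takeWhile_imp hb
        simpa using this
      rw [hrep]
      exact isChain_beq_cons_replicate c _
    · exact List.isChain_of_mem_splitBy hm
  · rw [List.isChain_cons]
    refine ⟨?_, List.isChain_getLast_head_splitBy _ _⟩
    intro y hy
    have hdw : rest.dropWhile (fun x => x == c) ≠ [] := by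
      intro hnil
      rw [hnil] at hy
      simp [List.splitBy_nil] at hy
    have hGne : (rest.dropWhile (fun x => x == c)).splitBy (· == ·) ≠ [] :=
      List.splitBy_ne_nil.2 hdw
    refine ⟨by simp, List.ne_nil_of_mem_splitBy (List.mem_of_mem_head? hy), ?_⟩
    have hy' : y = ((rest.dropWhile (fun x => x == c)).splitBy (· == ·)).head hGne :=
      (List.head_of_mem_head? hy).symm
    subst hy'
    rw [List.head_head_splitBy _ hdw, getLast_cons_takeWhile_beq]
    have hh : ¬((rest.dropWhile (fun x => x == c)).head hdw = c) := by
      simpa using List.head_dropWhile_not (fun x => x == c) hdw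
    rw [beq_eq_false_iff_ne]
    exact fun hcon => hh hcon.symm

-- rleB computes the splitBy run lengths.
theorem rleB_eq_splitBy (cs : List Char) :
    rleB cs = (cs.splitBy (· == ·)).map List.length := by
  induction cs using rleB.induct with
  | case1 => simp [rleB, List.splitBy_nil]
  | case2 c rest ih =>
    rw [rleB, splitBy_beq_cons, List.map_cons, ih]
    simp
    omega

-- runlensN computes the splitBy run lengths with a partially consumed head run.
theorem runlensN_eq_splitBy (ds : List Nat) :
    ∀ p k, runlensN p k ds =
      (k + (ds.takeWhile (fun x => x == p)).length)
        :: ((ds.dropWhile (fun x => x == p)).splitBy (· == ·)).map List.length := by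
  induction ds with
  | nil => intro p k; simp [runlensN, List.splitBy_nil]
  | cons d rest ih =>
    intro p k
    by_cases hdp : d = p
    · subst hdp
      rw [runlensN]
      simp only [if_pos rfl]
      rw [ih d (k + 1)]
      simp only [List.takeWhile_cons, List.dropWhile_cons, beq_self_eq_true, if_pos]
      simp [List.length_cons]
      omega
    · rw [runlensN]
      simp only [hdp, if_neg, ite_false]
      rw [ih d 1]
      have hbeq : (d == p) = false := by simpa using hdp
      simp only [List.takeWhile_cons, List.dropWhile_cons, hbeq, Bool.false_eq_true,
        if_false, List.length_nil, splitBy_beq_cons, List.map_cons]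
      simp
      omega

-- mapping a chain, with membership available for the implication
theorem isChain_map_of_isChain {α β : Type} {R : α → α → Prop} {S : β → β → Prop}
    (m : α → β) {l : List α} (h : l.IsChain R)
    (himp : ∀ a ∈ l, ∀ b ∈ l, R a b → S (m a) (m b)) : (l.map m).IsChain S := by
  induction l with
  | nil => exact List.isChain_nil
  | cons a tl ih =>
    rw [List.isChain_cons] at h
    rw [List.map_cons, List.isChain_cons]
    refine ⟨?_, ih h.2 (fun x hx y hy hr => himp x (by simp [hx]) y (by simp [hy]) hr)⟩
    intro y hy
    rw [List.head?_map] at hy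
    rw [Option.mem_def, Option.map_eq_some_iff] at hy
    obtain ⟨z, hz, rfl⟩ := hy
    exact himp a (by simp) z (by simp [List.mem_of_mem_head? hz]) (h.1 z hz)

-- splitBy of a reversed list: the reversed runs, in reverse order.
theorem splitBy_beq_reverse {α : Type} [BEq α] [LawfulBEq α] (l : List α) :
    l.reverse.splitBy (· == ·) = ((l.splitBy (· == ·)).map List.reverse).reverse := by
  rw [List.splitBy_eq_iff]
  refine ⟨?_, ?_, ?_, ?_⟩
  · rw [List.flatten_reverse, List.map_map]
    have : (List.reverse ∘ List.reverse) = (id : List α → List α) := by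
      funext x; simp
    rw [this, List.map_id, List.flatten_splitBy]
  · intro h
    rw [List.mem_reverse, List.mem_map] at h
    obtain ⟨g, hg, hg2⟩ := h
    exact List.ne_nil_of_mem_splitBy hg (by simpa using hg2)
  · intro m hm
    rw [List.mem_reverse, List.mem_map] at hm
    obtain ⟨g, hg, rfl⟩ := hm
    rw [List.isChain_reverse]
    have := List.isChain_of_mem_splitBy hg
    exact this.imp_of_mem_imp (fun a b _ _ h => by simpa [BEq.comm] using h)
  · rw [List.isChain_reverse]
    apply isChain_map_of_isChain List.reverse
      (List.isChain_getLast_head_splitBy (· == ·) l)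
    intro a _ b _ hab
    obtain ⟨ha, hb, hfalse⟩ := hab
    refine ⟨by simpa using hb, by simpa using ha, ?_⟩
    rw [List.getLast_reverse, List.head_reverse]
    simpa [BEq.comm] using hfalse

-- splitBy commutes with a map that is injective on the list's elements.
theorem splitBy_beq_map {α β : Type} [BEq α] [LawfulBEq α] [BEq β] [LawfulBEq β]
    (f : α → β) (l : List α)
    (hf : ∀ x ∈ l, ∀ y ∈ l, f x = f y → x = y) :
    (l.map f).splitBy (· == ·) = (l.splitBy (· == ·)).map (List.map f) := by
  rw [List.splitBy_eq_iff]
  have hmem : ∀ g ∈ l.splitBy (· == ·), ∀ x ∈ g, x ∈ l := by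
    intro g hg x hx
    rw [← List.flatten_splitBy (· == ·) l]
    exact List.mem_flatten.mpr ⟨g, hg, hx⟩
  refine ⟨?_, ?_, ?_, ?_⟩
  · rw [← List.map_flatten, List.flatten_splitBy]
  · intro h
    rw [List.mem_map] at h
    obtain ⟨g, hg, hg2⟩ := h
    exact List.ne_nil_of_mem_splitBy hg (by simpa using hg2)
  · intro m hm
    rw [List.mem_map] at hm
    obtain ⟨g, hg, rfl⟩ := hm
    apply isChain_map_of_isChain f (List.isChain_of_mem_splitBy hg)
    intro a _ b _ hr
    simp only [beq_iff_eq] at hr ⊢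
    exact congrArg f hr
  · apply isChain_map_of_isChain (List.map f)
      (List.isChain_getLast_head_splitBy (· == ·) l)
    intro a ha b hb hab
    obtain ⟨ha', hb', hfalse⟩ := hab
    refine ⟨by simpa using ha', by simpa using hb', ?_⟩
    rw [List.getLast_map, List.head_map]
    simp only [beq_eq_false_iff_ne, ne_eq] at hfalse ⊢
    intro hcon
    exact hfalse (hf _ (hmem a ha _ (List.getLast_mem ha')) _
      (hmem b hb _ (List.head_mem hb')) hcon)

-- scoreF with exhausted doubling budget is the plain sum of run bonuses.
theorem scoreF_nonpos {f : Int} (hf : f ≤ 0) (rs : List Nat) :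
    scoreF f rs = (rs.map baseV).sum := by
  induction rs generalizing f with
  | nil => simp [scoreF]
  | cons L rest ih =>
    simp only [scoreF, List.map_cons, List.sum_cons]
    rw [ih (by omega)]
    have : ¬(0 < f) := by omega
    simp [this]

theorem scoreF_one (L : Nat) (rest : List Nat) :
    scoreF 1 (L :: rest) = baseV L + ((L :: rest).map baseV).sum := by
  simp only [scoreF, List.map_cons, List.sum_cons]
  rw [scoreF_nonpos (by norm_num)]
  norm_num
  ring

-- scoreB is the plain sum plus an extra bonus for the last run.
theorem scoreB_eq_sum (rs : List Nat) (hne : rs ≠ []) :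
    scoreB rs = (rs.map baseV).sum + baseV (rs.getLast hne) := by
  induction rs with
  | nil => exact absurd rfl hne
  | cons L rest ih =>
    cases rest with
    | nil =>
      simp only [scoreB, List.map_cons, List.map_nil, List.sum_cons, List.sum_nil,
        List.getLast_singleton, baseV]
      by_cases hL : 2 ≤ L <;> simp [hL] <;> ring
    | cons M tl =>
      simp only [scoreB]
      rw [ih (by simp),
        show (L :: M :: tl).getLast hne = (M :: tl).getLast (by simp) from
          List.getLast_cons _]
      simp only [List.map_cons, List.sum_cons, baseV]
      ring

-- Nat.toDigits is the reversed digit characters.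
theorem toDigitsCore_eq (fuel : Nat) :
    ∀ m ds, m < fuel → 0 < m →
      Nat.toDigitsCore 10 fuel m ds = ((dLE m).map Nat.digitChar).reverse ++ ds := by
  induction fuel with
  | zero => intro m ds h; omega
  | succ fuel ih =>
    intro m ds hlt hpos
    rw [Nat.toDigitsCore]
    by_cases hz : m / 10 = 0
    · simp only [hz, if_pos]
      rw [dLE_pos hpos, hz, dLE_zero]
      simp
    · simp only [hz, if_neg, ite_false]
      rw [ih (m / 10) _ (by omega) (by omega)]
      rw [dLE_pos hpos]
      simp

theorem toDigits_eq {m : Nat} (hpos : 0 < m) :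
    Nat.toDigits 10 m = ((dLE m).map Nat.digitChar).reverse := by
  rw [Nat.toDigits, toDigitsCore_eq (m + 1) m [] (by omega) hpos]
  simp

theorem digitChar_inj {x y : Nat} (hx : x < 10) (hy : y < 10)
    (h : Nat.digitChar x = Nat.digitChar y) : x = y := by
  interval_cases x <;> interval_cases y <;> simp_all [Nat.digitChar]

-- Main positive case: both sides equal base-sum + head-run bonus.
theorem main_pos (m : Nat) (hm : 0 < m) :
    duplicate_digit_bonus (m : Int) = duplicate_digit_bonus_alt (m : Int) := by
  -- names for the digit list and its runs
  obtain ⟨d, rest, hds⟩ : ∃ d rest, dLE m = d :: rest := by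
    rw [dLE_pos hm]; exact ⟨_, _, rfl⟩
  have hGne : (dLE m).splitBy (· == ·) ≠ [] := by
    rw [List.splitBy_ne_nil, hds]; simp
  -- A's side
  have hA : duplicate_digit_bonus (m : Int) =
      scoreF 1 (((dLE m).splitBy (· == ·)).map List.length) := by
    rw [duplicate_digit_bonus, dupLoopA_eq_listLoopA m, hds, listLoopA]
    have hne : ¬((d : Int) = -1) := by omega
    have hlists : runlensN d 1 rest =
        ((d :: rest).splitBy (· == ·)).map List.length := by
      rw [runlensN_eq_splitBy, splitBy_beq_cons]
      simp [Nat.add_comm]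
    have h1 := listLoopA_eq_scoreF rest 0 1 d 1 le_rfl
    norm_num at h1
    simp only [hne, if_neg, ite_false, lt_irrefl, false_and, if_false]
    norm_num
    rw [h1, hlists, ← hds]
  -- B's side
  have hneg : ¬((m : Int) < 0) := by omega
  have htc : PySem.Int.toChars (m : Int) = ((dLE m).map Nat.digitChar).reverse := by
    rw [PySem.Int.toChars]
    have h1 : ¬((m : Int) < 0) := hneg
    simp only [h1, if_neg, ite_false, Int.toNat_natCast]
    exact toDigits_eq hm
  have hB : duplicate_digit_bonus_alt (m : Int) =
      scoreB ((((dLE m).splitBy (· == ·)).map List.length).reverse) := by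
    rw [duplicate_digit_bonus_alt]
    simp only [hneg, if_neg, ite_false]
    rw [htc, rleB_eq_splitBy, splitBy_beq_reverse,
      splitBy_beq_map Nat.digitChar (dLE m)
        (fun x hx y hy => digitChar_inj (dLE_lt x hx) (dLE_lt y hy))]
    rw [List.map_reverse]
    simp only [List.map_map]
    refine congrArg scoreB (congrArg List.reverse ?_)
    apply List.map_congr_left
    intro g _
    simp
  -- both reduce to sum + head-run bonus
  rw [hA, hB]
  set RS := ((dLE m).splitBy (· == ·)).map List.length with hRS
  have hRSne : RS ≠ [] := by simp [hRS, List.map_eq_nil_iff, hGne]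
  obtain ⟨L0, rs', hcons⟩ := List.exists_cons_of_ne_nil hRSne
  rw [hcons, scoreF_one]
  have hrevne : (L0 :: rs').reverse ≠ [] := by simp
  rw [scoreB_eq_sum _ hrevne]
  rw [List.getLast_reverse]
  simp only [List.map_reverse, List.sum_reverse, List.head_cons]
  exact add_comm _ _

-- ===== VERDICT (by name: the statement is the Claim_ definition above) =====
theorem duplicate_digit_bonus_spec : Claim_equal_duplicate_digit_bonus := by
  intro n _
  unfold Spec_duplicate_digit_bonus
  rcases lt_trichotomy n 0 with hn | hn | hn
  · rw [duplicate_digit_bonus, dupLoopA, duplicate_digit_bonus_alt]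
    have : ¬(0 ≤ n) := by omega
    simp [this, hn]
  · subst hn
    have hA0 : duplicate_digit_bonus 0 = 0 := by
      rw [duplicate_digit_bonus]
      calc dupLoopA 0 (-1) 0 2 (((0 : Nat) : Int))
          = listLoopA 0 (-1) 0 2 (dLE 0) := dupLoopA_eq_listLoopA 0 0 (-1) 0 2
        _ = 0 := by rw [dLE_zero]; simp [listLoopA]
    rw [hA0, duplicate_digit_bonus_alt, if_neg (by norm_num),
      show PySem.Int.toChars 0 = ['0'] from rfl, rleB_eq_splitBy, splitBy_beq_cons]
    norm_num [List.splitBy_nil, scoreB]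
  · have hm : n = ((n.toNat : Nat) : Int) := by omega
    rw [hm]
    exact main_pos n.toNat (by omega)
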